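-- pv_equiv track=rewrite | github.com/yiyabo/GAgent | tool_box/tools_impl/url_fetch.py | _content_type_allowed
-- ===== SOURCE A (Python) =====
-- from typing import Any, Dict, List, Optional, Sequence, Tuple
--
-- def _content_type_allowed(
--     actual: Optional[str],
--     allowed: Sequence[str],
-- ) -> bool:
--     if not allowed:
--         return True
--     if actual is None:
--         return False
--     lowered = actual.lower()
--     for pattern in allowed:
--         if pattern == "*/*":
--             return True
--         if pattern.endswith("/*"):
--             prefix = pattern[:-1]
--             if lowered.startswith(prefix):
--                 return True
--         elif lowered == pattern:
--             return True
--     return False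
-- ===== SOURCE B (Python) =====
-- def _content_type_allowed(actual, allowed):
--     if not allowed:
--         return True
--     if actual is None:
--         return False
--     lowered = actual.lower()
--     # Invert A's scan: enumerate every pattern that COULD match this content type
--     # (the full wildcard, the exact string, and one 'prefix*' per '/' in it),
--     # then ask whether any allowed pattern is one of them.
--     candidates = {"*/*", lowered}
--     for i, ch in enumerate(lowered):
--         if ch == "/":
--             candidates.add(lowered[:i + 1] + "*")
--     return any(p in candidates for p in allowed)
-- ===== Notes on version B (the rewrite author's own statement) =====
-- stated objective: alternative
-- what changed: Inverts the matching direction: instead of testing each allowed pattern against the content type as A does, B enumerates from the lowered content type the complete set of patterns that could match it (the '*/*' wildcard, the exact string, and one 'prefix*' candidate per '/' it contains) and then just intersects that candidate set with the allowed list.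
import Mathlib
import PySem

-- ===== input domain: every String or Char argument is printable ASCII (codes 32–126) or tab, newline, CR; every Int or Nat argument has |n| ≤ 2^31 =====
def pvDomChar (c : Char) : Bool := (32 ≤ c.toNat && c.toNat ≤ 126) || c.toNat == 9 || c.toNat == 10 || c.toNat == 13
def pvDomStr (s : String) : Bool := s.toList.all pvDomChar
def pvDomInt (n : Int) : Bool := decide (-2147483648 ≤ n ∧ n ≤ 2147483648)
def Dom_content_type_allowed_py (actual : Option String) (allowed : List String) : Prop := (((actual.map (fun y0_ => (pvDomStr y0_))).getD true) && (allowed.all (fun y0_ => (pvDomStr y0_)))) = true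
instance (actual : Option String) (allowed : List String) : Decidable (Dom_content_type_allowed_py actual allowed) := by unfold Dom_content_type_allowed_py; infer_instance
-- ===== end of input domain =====

-- B inverts A's pattern scan: instead of testing each allowed pattern against the
-- content type, it enumerates from the lowered content type every pattern that could
-- match it (wildcard, exact, one 'prefix*' per '/') and intersects with `allowed`;
-- objective: alternative, same asymptotic cost.

-- ===== PORT A =====
-- the for-loop of A, early returns as boolean results
def ctaLoopA (lowered : String) : List String → Bool
  | [] => false
  | pattern :: rest =>
    if pattern = "*/*" then true
    else if PySem.Str.endswith pattern "/*" then
      if PySem.Str.startswith lowered (PySem.Str.slice pattern none (some (-1))) then true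
      else ctaLoopA lowered rest
    else if lowered = pattern then true
    else ctaLoopA lowered rest

def content_type_allowed_py (actual : Option String) (allowed : List String) : Bool :=
  if allowed = [] then true
  else match actual with
  | none => false
  | some a => ctaLoopA (PySem.Str.lower a) allowed

-- ===== PORT B =====
-- Source B's candidate set: {"*/*", lowered} plus lowered[:i+1]+"*" for every '/' at i
-- (strings handled as List Char per the PySem convention)
def ctbCandidates (lw : List Char) : PySem.Set (List Char) :=
  (PySem.List.enumerate lw).foldl
    (fun cands p =>
      if p.2 = '/' then
        PySem.Set.add cands (PySem.Chars.slice lw none (some (p.1 + 1)) ++ ['*'])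
      else cands)
    (PySem.Set.add (PySem.Set.add PySem.Set.empty "*/*".toList) lw)

def content_type_allowed_py_alt (actual : Option String) (allowed : List String) : Bool :=
  if allowed = [] then true
  else match actual with
  | none => false
  | some a =>
    let lw := PySem.Chars.lower a.toList
    let cands := ctbCandidates lw
    allowed.any (fun p => PySem.Set.contains cands p.toList)

-- ===== PRECONDITION & SPEC =====
def Spec_content_type_allowed_py (actual : Option String) (allowed : List String) (out : Bool) : Prop := out = content_type_allowed_py_alt actual allowed
instance (actual : Option String) (allowed : List String) (out : Bool) : Decidable (Spec_content_type_allowed_py actual allowed out) := by unfold Spec_content_type_allowed_py; infer_instance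

-- ===== CLAIM (what is proved, stated in full; the proofs are below) =====
def Claim_equal_content_type_allowed_py : Prop := ∀ (actual : Option String) (allowed : List String), Dom_content_type_allowed_py actual allowed → Spec_content_type_allowed_py actual allowed (content_type_allowed_py actual allowed)

-- ===== LEMMAS AND PROOFS =====

-- membership after the candidate-building fold, started at offset s with accumulator c0
lemma mem_fold_cands (lw : List Char) (l : List Char) (s : Int)
    (c0 : PySem.Set (List Char)) (q : List Char) :
    q ∈ (PySem.List.enumerate l s).foldl
      (fun cands p =>
        if p.2 = '/' then
          PySem.Set.add cands (PySem.Chars.slice lw none (some (p.1 + 1)) ++ ['*'])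
        else cands) c0 ↔
    q ∈ c0 ∨ ∃ i : Nat, i < l.length ∧ l[i]? = some '/' ∧
      q = PySem.Chars.slice lw none (some (s + i + 1)) ++ ['*'] := by
  induction l generalizing s c0 with
  | nil => simp [PySem.List.enumerate]
  | cons x xs ih =>
    rw [PySem.List.enumerate_cons, List.foldl_cons]
    have hacc : (if (s, x).2 = '/' then
          PySem.Set.add c0 (PySem.Chars.slice lw none (some ((s, x).1 + 1)) ++ ['*'])
        else c0)
      = if x = '/' then
          PySem.Set.add c0 (PySem.Chars.slice lw none (some (s + 1)) ++ ['*'])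
        else c0 := rfl
    rw [hacc, ih]
    by_cases hx : x = '/'
    · rw [if_pos hx]
      simp only [PySem.Set.mem_add]
      constructor
      · rintro (⟨h | h⟩ | ⟨i, hi, hget, hq⟩)
        · exact Or.inl h
        · exact Or.inr ⟨0, by simp, by simp [hx], by simpa using h⟩
        · refine Or.inr ⟨i + 1, by simpa using hi, by simpa using hget, ?_⟩
          rw [hq]
          have harith : s + 1 + (i : Int) + 1 = s + ((i + 1 : Nat) : Int) + 1 := by
            push_cast; ring
          rw [harith]
      · rintro (h | ⟨i, hi, hget, hq⟩)
        · exact Or.inl (Or.inl h)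
        · cases i with
          | zero => exact Or.inl (Or.inr (by simpa using hq))
          | succ j =>
            refine Or.inr ⟨j, by simpa using hi, by simpa using hget, ?_⟩
            rw [hq]
            have harith : s + ((j + 1 : Nat) : Int) + 1 = s + 1 + (j : Int) + 1 := by
              push_cast; ring
            rw [harith]
    · rw [if_neg hx]
      constructor
      · rintro (h | ⟨i, hi, hget, hq⟩)
        · exact Or.inl h
        · refine Or.inr ⟨i + 1, by simpa using hi, by simpa using hget, ?_⟩
          rw [hq]
          have harith : s + 1 + (i : Int) + 1 = s + ((i + 1 : Nat) : Int) + 1 := by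
            push_cast; ring
          rw [harith]
      · rintro (h | ⟨i, hi, hget, hq⟩)
        · exact Or.inl h
        · cases i with
          | zero => exact absurd (by simpa using hget) hx
          | succ j =>
            refine Or.inr ⟨j, by simpa using hi, by simpa using hget, ?_⟩
            rw [hq]
            have harith : s + ((j + 1 : Nat) : Int) + 1 = s + 1 + (j : Int) + 1 := by
              push_cast; ring
            rw [harith]

-- characterization of the candidate set
lemma mem_cands (lw q : List Char) :
    q ∈ ctbCandidates lw ↔
    q = "*/*".toList ∨ q = lw ∨
      ∃ i : Nat, i < lw.length ∧ lw[i]? = some '/' ∧ q = lw.take (i + 1) ++ ['*'] := by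
  unfold ctbCandidates
  rw [mem_fold_cands]
  simp only [PySem.Set.mem_add]
  constructor
  · rintro (((h | h) | h) | ⟨i, hi, hget, hq⟩)
    · simp [PySem.Set.empty] at h
    · exact Or.inl (by simpa using h)
    · exact Or.inr (Or.inl h)
    · refine Or.inr (Or.inr ⟨i, hi, hget, ?_⟩)
      rw [hq]
      simp only [PySem.Chars.slice_eq_listSlice]
      rw [show (0 : Int) + (i : Int) + 1 = ((i + 1 : Nat) : Int) by push_cast; ring,
        PySem.List.slice_to_natCast]
  · rintro (h | h | ⟨i, hi, hget, hq⟩)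
    · exact Or.inl (Or.inl (Or.inr (by simpa using h)))
    · exact Or.inl (Or.inr h)
    · refine Or.inr ⟨i, hi, hget, ?_⟩
      rw [hq]
      simp only [PySem.Chars.slice_eq_listSlice]
      rw [show (0 : Int) + (i : Int) + 1 = ((i + 1 : Nat) : Int) by push_cast; ring,
        PySem.List.slice_to_natCast]

-- one pattern: A's three-way test equals membership in B's candidate set
lemma head_match (lowered p : String) :
    (if p = "*/*" then true
     else if PySem.Str.endswith p "/*" then
       PySem.Str.startswith lowered (PySem.Str.slice p none (some (-1)))
     else decide (lowered = p))
    = PySem.Set.contains (ctbCandidates lowered.toList) p.toList := by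
  rw [Bool.eq_iff_iff, PySem.Set.contains_iff, mem_cands]
  by_cases hw : p = "*/*"
  · simp [hw]
  · have hw' : p.toList ≠ "*/*".toList := fun h => hw (by
      have := congrArg String.ofList h
      simpa using this)
    simp only [if_neg hw]
    by_cases he : PySem.Str.endswith p "/*" = true
    · simp only [he]
      have he' : "/*".toList <:+ p.toList :=
        (PySem.Chars.endswith_iff p.toList "/*".toList).mp (by simpa using he)
      obtain ⟨t, ht⟩ := he'
      have hp : p.toList = t ++ ['/', '*'] := ht.symm
      have hdrop : (PySem.Str.slice p none (some (-1))).toList = t ++ ['/'] := by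
        rw [PySem.Str.slice_to_neg_one, hp]
        have hsplit : t ++ ['/', '*'] = (t ++ ['/']) ++ ['*'] := by simp
        rw [hsplit, List.dropLast_concat]
      constructor
      · intro hs
        have hs' : (t ++ ['/']) <+: lowered.toList := by
          have := (PySem.Chars.startswith_iff lowered.toList
            (PySem.Str.slice p none (some (-1))).toList).mp (by simpa using hs)
          rwa [hdrop] at this
        obtain ⟨r, hr⟩ := hs'
        refine Or.inr (Or.inr ⟨t.length, ?_, ?_, ?_⟩)
        · rw [← hr]; simp
        · rw [← hr, List.getElem?_append_left (by simp)]
          exact List.getElem?_concat_length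
        · rw [hp, ← hr]
          have htake : ((t ++ ['/']) ++ r).take (t.length + 1) = t ++ ['/'] := by
            rw [List.take_left' (by simp)]
          rw [htake]; simp
      · rintro (h | h | ⟨i, hi, hget, hq⟩)
        · exact absurd h hw'
        · -- the pattern IS the lowered string; it starts with its own init
          have : (PySem.Str.slice p none (some (-1))).toList <+: lowered.toList := by
            rw [hdrop, ← h, hp]
            exact ⟨['*'], by simp⟩
          simpa using (PySem.Chars.startswith_iff lowered.toList
            (PySem.Str.slice p none (some (-1))).toList).mpr this
        · -- the pattern is one of the 'prefix*' candidates
          have e1 : (t ++ ['/']) ++ ['*'] = lowered.toList.take (i + 1) ++ ['*'] := by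
            simpa using hp.symm.trans hq
          have h2 : t ++ ['/'] = lowered.toList.take (i + 1) := by
            have := congrArg List.dropLast e1
            simpa [List.dropLast_concat] using this
          have : (PySem.Str.slice p none (some (-1))).toList <+: lowered.toList := by
            rw [hdrop, h2]
            exact List.take_prefix _ _
          simpa using (PySem.Chars.startswith_iff lowered.toList
            (PySem.Str.slice p none (some (-1))).toList).mpr this
    · rw [if_neg he]
      simp only [decide_eq_true_eq]
      constructor
      · intro h
        exact Or.inr (Or.inl (by rw [h]))
      · rintro (h | h | ⟨i, hi, hget, hq⟩)
        · exact absurd h hw'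
        · have := congrArg String.ofList h
          simpa using this.symm
        · -- such a candidate ends in "/*", contradicting ¬endswith
          exfalso
          apply he
          have htake : lowered.toList.take (i + 1)
              = lowered.toList.take i ++ ['/'] := by
            rw [List.take_add_one, hget]; rfl
          have hsuf : "/*".toList <:+ p.toList := by
            rw [hq, htake]
            exact ⟨lowered.toList.take i, by simp⟩
          simpa using (PySem.Chars.endswith_iff p.toList "/*".toList).mpr hsuf

-- A's scan equals B's any-over-candidates
lemma loopA_eq_any (lowered : String) (l : List String) :
    ctaLoopA lowered l
      = l.any (fun p => PySem.Set.contains (ctbCandidates lowered.toList) p.toList) := by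
  induction l with
  | nil => rfl
  | cons p rest ih =>
    rw [List.any_cons, ← head_match lowered p, ← ih]
    simp only [ctaLoopA]
    split_ifs with h1 h2 h3 h4 <;> simp_all

-- ===== VERDICT (by name: the statement is the Claim_ definition above) =====
theorem content_type_allowed_py_spec : Claim_equal_content_type_allowed_py := by
  intro actual allowed _
  unfold Spec_content_type_allowed_py content_type_allowed_py content_type_allowed_py_alt
  by_cases hemp : allowed = []
  · simp [hemp]
  · simp only [if_neg hemp]
    cases actual with
    | none => rfl
    | some a =>
      simp only
      rw [loopA_eq_any]
      congr 1
      simp [PySem.Str.toList_lower]
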